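-- pv_equiv track=rewrite | github.com/bdunne6/Advent-Of-Code | 2015/python/aoc3.py | get_present_map
-- ===== SOURCE A (Python) =====
-- step_lookup = {'<':[-1,0],'^':[0,1],'>':[1,0],'v':[0,-1]}
--
-- def get_present_map(moves):
--     position = [0,0]
--     presents = {tuple([0,0]):1}
--
--     for d in moves:
--         step = step_lookup[d]
--         position[0] += step[0]
--         position[1] += step[1]
--         position_tuple = tuple(position)
--         if position_tuple in presents:
--             presents[position_tuple] +=1
--         else:
--             presents[position_tuple] = 1
--     return presents
-- ===== SOURCE B (Python) =====
-- step_lookup = {'<': (-1, 0), '^': (0, 1), '>': (1, 0), 'v': (0, -1)}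
--
--
-- def get_present_map(moves):
--     # Divide and conquer: count the visited positions of each half of the walk
--     # independently (the right half relative to the midpoint position), then
--     # merge the two count maps; finally merge under the starting cell's visit.
--     counts, _end = _visit_counts(moves, (0, 0))
--     result = {(0, 0): 1}
--     _merge_into(result, counts)
--     return result
--
--
-- def _visit_counts(moves, pos):
--     """Count map of the positions reached after each move of `moves` starting
--     at `pos`, together with the final position."""
--     if len(moves) == 0:
--         return {}, pos
--     if len(moves) == 1:
--         dx, dy = step_lookup[moves]
--         end = (pos[0] + dx, pos[1] + dy)
--         return {end: 1}, end
--     mid = len(moves) // 2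
--     left, mid_pos = _visit_counts(moves[:mid], pos)
--     right, end = _visit_counts(moves[mid:], mid_pos)
--     _merge_into(left, right)
--     return left, end
--
--
-- def _merge_into(dst, src):
--     for k, v in src.items():
--         dst[k] = dst.get(k, 0) + v
-- ===== Notes on version B (the rewrite author's own statement) =====
-- stated objective: alternative
-- what changed: B replaces A's single fused move-and-count loop by a divide-and-conquer recursion: each half of the move string is counted independently (the right half starting from the midpoint position) and the two count maps are merged, with the start cell's visit merged in at the end.
-- outside the precondition, e.g. on get_present_map('x'): A raises KeyError, B raises KeyError
import Mathlib
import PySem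

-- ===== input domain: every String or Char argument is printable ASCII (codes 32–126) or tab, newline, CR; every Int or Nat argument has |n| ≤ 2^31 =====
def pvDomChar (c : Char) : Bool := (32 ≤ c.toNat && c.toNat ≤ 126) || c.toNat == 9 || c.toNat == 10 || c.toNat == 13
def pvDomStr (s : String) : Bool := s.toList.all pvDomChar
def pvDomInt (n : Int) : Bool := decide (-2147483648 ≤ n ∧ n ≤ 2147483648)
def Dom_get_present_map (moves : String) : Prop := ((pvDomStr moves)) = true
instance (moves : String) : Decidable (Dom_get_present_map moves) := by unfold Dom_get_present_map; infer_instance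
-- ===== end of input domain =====

-- B replaces A's single fused move-and-count loop by a divide-and-conquer walk:
-- each half of the move string is counted independently and the two count maps
-- are merged; objective: alternative algorithm (same result, recursive structure).

-- ===== PORT A =====
-- module-level constant step_lookup (shared context of both Pythons)
def stepLookup : PySem.Dict Char (Int × Int) :=
  PySem.Dict.ofList [('<', (-1, 0)), ('^', (0, 1)), ('>', (1, 0)), ('v', (0, -1))]

-- step_lookup[d]; Pre_ guarantees d is a key, so the default is never used
def stepOf (d : Char) : Int × Int := PySem.Dict.getD stepLookup d (0, 0)

-- loop body of A: advance position, then if/else increment of the presents dict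
def aStep (st : (Int × Int) × PySem.Dict (Int × Int) Int) (d : Char) :
    (Int × Int) × PySem.Dict (Int × Int) Int :=
  let step := stepOf d
  let pos : Int × Int := (st.1.1 + step.1, st.1.2 + step.2)
  let presents :=
    if PySem.Dict.contains st.2 pos then
      PySem.Dict.insert st.2 pos (PySem.Dict.getD st.2 pos 0 + 1)
    else
      PySem.Dict.insert st.2 pos 1
  (pos, presents)

def get_present_map (moves : String) : List (Int × Int × Int) :=
  let r := moves.toList.foldl aStep ((0, 0), PySem.Dict.insert PySem.Dict.empty (0, 0) 1)
  r.2.items.map (fun p => (p.1.1, p.1.2, p.2))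

-- ===== PORT B =====
-- loop body of _merge_into: dst[k] = dst.get(k, 0) + v
def addOnce (d : PySem.Dict (Int × Int) Int) (p : (Int × Int) × Int) :
    PySem.Dict (Int × Int) Int :=
  d.insert p.1 (d.getD p.1 0 + p.2)

-- _merge_into(dst, src): fold the addition of src's items into dst
def mergeInto (dst src : PySem.Dict (Int × Int) Int) : PySem.Dict (Int × Int) Int :=
  src.items.foldl addOnce dst

-- _visit_counts(moves, pos): divide and conquer on the move list
-- (moves[:mid] / moves[mid:] with 0 ≤ mid ≤ len are exactly take/drop)
def visitCounts : List Char → (Int × Int) → PySem.Dict (Int × Int) Int × (Int × Int)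
  | [], pos => (PySem.Dict.empty, pos)
  | [d], pos =>
      let s := stepOf d
      let e : Int × Int := (pos.1 + s.1, pos.2 + s.2)
      (PySem.Dict.insert PySem.Dict.empty e 1, e)
  | a :: b :: rest, pos =>
      let mid := (a :: b :: rest).length / 2
      let lr := visitCounts ((a :: b :: rest).take mid) pos
      let rr := visitCounts ((a :: b :: rest).drop mid) lr.2
      (mergeInto lr.1 rr.1, rr.2)
termination_by l _ => l.length
decreasing_by
  · simp only [List.length_take, List.length_cons]; omega
  · simp only [List.length_drop, List.length_cons]; omega

def get_present_map_alt (moves : String) : List (Int × Int × Int) :=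
  let counts := (visitCounts moves.toList (0, 0)).1
  let result := mergeInto (PySem.Dict.insert PySem.Dict.empty (0, 0) 1) counts
  result.items.map (fun p => (p.1.1, p.1.2, p.2))

-- ===== PRECONDITION & SPEC =====
-- A raises KeyError (step_lookup[d]) on any character that is not one of the four direction keys; Pre_ excludes exactly those.
def Pre_get_present_map (moves : String) : Prop :=
  (moves.toList.all (fun c => c == '<' || c == '^' || c == '>' || c == 'v')) = true
instance (moves : String) : Decidable (Pre_get_present_map moves) := by
  unfold Pre_get_present_map; infer_instance
def pvWitness_get_present_map : String := "^>v<<^"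

def Spec_get_present_map (moves : String) (out : List (Int × Int × Int)) : Prop := out = get_present_map_alt moves
instance (moves : String) (out : List (Int × Int × Int)) : Decidable (Spec_get_present_map moves out) := by unfold Spec_get_present_map; infer_instance

-- ===== CLAIM (what is proved, stated in full; the proofs are below) =====
def Claim_equal_get_present_map : Prop := ∀ (moves : String), Dom_get_present_map moves → Pre_get_present_map moves → Spec_get_present_map moves (get_present_map moves)

-- ===== LEMMAS AND PROOFS =====

-- proof-only abstractions: the positions visited after the start, and the end position
def pathFrom (pos : Int × Int) : List Char → List (Int × Int)
  | [] => []
  | d :: l =>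
      let s := stepOf d
      let p : Int × Int := (pos.1 + s.1, pos.2 + s.2)
      p :: pathFrom p l

def travel (pos : Int × Int) (l : List Char) : Int × Int :=
  l.foldl (fun p d => (p.1 + (stepOf d).1, p.2 + (stepOf d).2)) pos

-- proof-only: first-match lookup with default 0 in a raw pair list
def lookD : List ((Int × Int) × Int) → (Int × Int) → Int
  | [], _ => 0
  | p :: ps, k => if k = p.1 then p.2 else lookD ps k

theorem lookD_eq_zero_of_not_mem (ps : List ((Int × Int) × Int)) (k : Int × Int)
    (h : k ∉ ps.map Prod.fst) : lookD ps k = 0 := by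
  induction ps with
  | nil => rfl
  | cons p ps ih =>
      simp only [List.map_cons, List.mem_cons, not_or] at h
      simp only [lookD, if_neg h.1]
      exact ih h.2

theorem lookD_map (ks : List (Int × Int)) (f : Int × Int → Int) (q : Int × Int) :
    lookD (ks.map (fun k => (k, f k))) q = if q ∈ ks then f q else 0 := by
  induction ks with
  | nil => simp [lookD]
  | cons k ks ih =>
      by_cases h : q = k
      · simp [lookD, h]
      · simp [lookD, h, ih]

theorem sum_lemma_big (ps : List ((Int × Int) × Int)) :
    ∀ (d : PySem.Dict (Int × Int) Int), d.keys.Nodup → (ps.map Prod.fst).Nodup →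
    (ps.foldl addOnce d).items
      = d.items.map (fun q => (q.1, q.2 + lookD ps q.1))
        ++ ps.filter (fun p => !(d.contains p.1)) := by
  induction ps with
  | nil =>
      intro d _ _
      simp [lookD]
  | cons p ps ih =>
      intro d hd hps
      simp only [List.map_cons, List.nodup_cons] at hps
      have hps1 : p.1 ∉ ps.map Prod.fst := hps.1
      have hlook0 : lookD ps p.1 = 0 := lookD_eq_zero_of_not_mem ps p.1 hps1
      simp only [List.foldl_cons]
      by_cases hc : d.contains p.1 = true
      · -- existing key: in-place update
        have hd' : (addOnce d p).keys.Nodup := by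
          unfold addOnce; exact PySem.Dict.nodup_keys_insert _ _ _ hd
        rw [ih (addOnce d p) hd' hps.2]
        have hitems : (addOnce d p).items
            = d.items.map (fun q => if q.1 == p.1 then (p.1, d.getD p.1 0 + p.2) else q) := by
          unfold addOnce; exact PySem.Dict.items_insert_of_contains d _ hc
        rw [hitems, List.map_map]
        have hmap : ∀ q ∈ d.items,
            ((fun q => (q.1, q.2 + lookD ps q.1)) ∘
              (fun q => if q.1 == p.1 then (p.1, d.getD p.1 0 + p.2) else q)) q
            = (q.1, q.2 + lookD (p :: ps) q.1) := by
          intro q hq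
          by_cases hqp : q.1 = p.1
          · have hgd : d.getD q.1 0 = q.2 :=
              PySem.Dict.getD_of_mem_items d (by simpa using hq) hd 0
            simp only [Function.comp, hqp, beq_self_eq_true, if_pos, lookD]
            rw [← hqp, hgd]
            simp [hqp, hlook0]
          · simp only [Function.comp, lookD]
            rw [if_neg (by simpa using hqp), if_neg hqp]
        rw [List.map_congr_left hmap]
        have hfilter : (p :: ps).filter (fun x => !(d.contains x.1))
            = ps.filter (fun x => !(d.contains x.1)) := by
          simp [hc]
        have hfilter2 : ps.filter (fun x => !((addOnce d p).contains x.1))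
            = ps.filter (fun x => !(d.contains x.1)) := by
          apply List.filter_congr
          intro x hx
          have hne : x.1 ≠ p.1 := by
            intro he; exact hps1 (he ▸ List.mem_map_of_mem hx)
          unfold addOnce
          rw [PySem.Dict.contains_insert]
          simp [hne]
        rw [hfilter, hfilter2]
      · -- fresh key: append
        have hc' : d.contains p.1 = false := by simpa using hc
        have hd' : (addOnce d p).keys.Nodup := by
          unfold addOnce; exact PySem.Dict.nodup_keys_insert _ _ _ hd
        rw [ih (addOnce d p) hd' hps.2]
        have hg0 : d.getD p.1 0 = 0 := PySem.Dict.getD_of_not_contains d 0 hc'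
        have hitems : (addOnce d p).items = d.items ++ [(p.1, p.2)] := by
          unfold addOnce
          rw [PySem.Dict.items_insert_of_not_contains d _ hc', hg0]
          simp
        rw [hitems, List.map_append]
        have hkey : ∀ q ∈ d.items, q.1 ≠ p.1 := by
          intro q hq he
          have : p.1 ∈ d.keys := by
            rw [← he]; exact PySem.Dict.mem_keys_of_mem_items d hq
          rw [← PySem.Dict.contains_iff_mem_keys] at this
          rw [hc'] at this; exact Bool.false_ne_true this
        have hmap : ∀ q ∈ d.items,
            (fun q => (q.1, q.2 + lookD ps q.1)) q = (q.1, q.2 + lookD (p :: ps) q.1) := by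
          intro q hq
          simp only [lookD, if_neg (hkey q hq)]
        rw [List.map_congr_left hmap]
        have hfilter2 : ps.filter (fun x => !((addOnce d p).contains x.1))
            = ps.filter (fun x => !(d.contains x.1)) := by
          apply List.filter_congr
          intro x hx
          have hne : x.1 ≠ p.1 := by
            intro he; exact hps1 (he ▸ List.mem_map_of_mem hx)
          unfold addOnce
          rw [PySem.Dict.contains_insert]
          simp [hne]
        have hfilter : (p :: ps).filter (fun x => !(d.contains x.1))
            = p :: ps.filter (fun x => !(d.contains x.1)) := by
          simp [hc']
        rw [hfilter2, hfilter]
        simp [lookD, hlook0]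

-- merging two counters is counting the concatenation
theorem merge_counters (xs ys : List (Int × Int)) :
    mergeInto (PySem.Dict.counter xs) (PySem.Dict.counter ys)
      = PySem.Dict.counter (xs ++ ys) := by
  apply PySem.Dict.ext
  unfold mergeInto
  have hkeys : ((PySem.Dict.counter ys).items.map Prod.fst).Nodup := by
    rw [PySem.Dict.items_counter, List.map_map]
    simp [Function.comp_def, PySem.Set.nodup_ofList]
  rw [sum_lemma_big _ _ (PySem.Dict.nodup_keys_counter xs) hkeys]
  rw [PySem.Dict.items_counter, PySem.Dict.items_counter, PySem.Dict.items_counter,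
    PySem.Set.ofList_append, PySem.Set.update_eq_append_filter, List.map_append, List.map_map]
  congr 1
  · -- existing keys: counts add across the concatenation
    apply List.map_congr_left
    intro k hk
    have hlook : lookD ((PySem.Set.ofList ys).map (fun k => (k, (List.count k ys : Int)))) k
        = (List.count k ys : Int) := by
      rw [lookD_map]
      by_cases h : k ∈ ys
      · simp [PySem.Set.mem_ofList, h]
      · simp [PySem.Set.mem_ofList, h, List.count_eq_zero.mpr h]
    simp only [Function.comp_def, hlook]
    simp [List.count_append]

  · -- fresh keys: they do not occur in xs, so the counts agree too
    rw [List.filter_map]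
    have hpred : List.filter
          ((fun p => !(PySem.Dict.counter xs).contains p.1) ∘ fun k => (k, (List.count k ys : Int)))
          (PySem.Set.ofList ys)
        = List.filter (fun y => !(PySem.Set.ofList xs).contains y) (PySem.Set.ofList ys) := by
      apply List.filter_congr
      intro k _
      simp [PySem.Dict.contains_counter, PySem.Set.contains_eq_listContains,
        List.contains_eq_mem, PySem.Set.mem_ofList]
    rw [hpred]
    apply List.map_congr_left
    intro k hk
    have hk' : k ∉ xs := by
      have := List.of_mem_filter hk
      simpa [PySem.Set.contains_eq_listContains, List.contains_eq_mem, PySem.Set.mem_ofList]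
        using this
    simp [List.count_append, List.count_eq_zero.mpr hk']

theorem pathFrom_append (l1 : List Char) :
    ∀ (pos : Int × Int) (l2 : List Char),
      pathFrom pos (l1 ++ l2) = pathFrom pos l1 ++ pathFrom (travel pos l1) l2 := by
  induction l1 with
  | nil => intro pos l2; simp [pathFrom, travel]
  | cons d l ih =>
      intro pos l2
      simp only [List.cons_append, pathFrom, ih, travel, List.foldl_cons]

theorem visitCounts_eq_aux (n : Nat) : ∀ (l : List Char), l.length ≤ n → ∀ (pos : Int × Int),
    visitCounts l pos = (PySem.Dict.counter (pathFrom pos l), travel pos l) := by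
  induction n with
  | zero =>
      intro l hl pos
      have hnil : l = [] := List.eq_nil_of_length_eq_zero (Nat.le_zero.mp hl)
      subst hnil
      simp [visitCounts, pathFrom, travel, PySem.Dict.counter]
  | succ n ih =>
      intro l hl pos
      match l with
      | [] => simp [visitCounts, pathFrom, travel, PySem.Dict.counter]
      | [d] =>
          have h := PySem.Dict.foldl_insert_getD_add_one_eq_counter
            (xs := [((pos.1 + (stepOf d).1, pos.2 + (stepOf d).2) : Int × Int)])
          simp only [List.foldl_cons, List.foldl_nil, PySem.Dict.getD_empty, zero_add] at h
          simp [visitCounts, pathFrom, travel, ← h]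
      | a :: b :: rest =>
          simp only [visitCounts]
          simp only [List.length_cons] at hl
          rw [ih _ (by simp only [List.length_take, List.length_cons]; omega) pos]
          rw [ih _ (by simp only [List.length_drop, List.length_cons]; omega)]
          dsimp only
          rw [merge_counters]
          have hp : pathFrom pos (a :: b :: rest)
              = pathFrom pos ((a :: b :: rest).take ((a :: b :: rest).length / 2))
                ++ pathFrom (travel pos ((a :: b :: rest).take ((a :: b :: rest).length / 2)))
                  ((a :: b :: rest).drop ((a :: b :: rest).length / 2)) := by
            conv_lhs => rw [← List.take_append_drop ((a :: b :: rest).length / 2) (a :: b :: rest)]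
            rw [pathFrom_append]
          have ht : travel pos (a :: b :: rest)
              = travel (travel pos ((a :: b :: rest).take ((a :: b :: rest).length / 2)))
                  ((a :: b :: rest).drop ((a :: b :: rest).length / 2)) := by
            conv_lhs => rw [← List.take_append_drop ((a :: b :: rest).length / 2) (a :: b :: rest)]
            unfold travel
            rw [List.foldl_append]
          rw [hp, ht]

theorem visitCounts_eq (l : List Char) (pos : Int × Int) :
    visitCounts l pos = (PySem.Dict.counter (pathFrom pos l), travel pos l) :=
  visitCounts_eq_aux l.length l le_rfl pos

-- A's loop body with the dict projected out is the uniform counting update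
def bCount (c : PySem.Dict (Int × Int) Int) (p : Int × Int) : PySem.Dict (Int × Int) Int :=
  PySem.Dict.insert c p (PySem.Dict.getD c p 0 + 1)

theorem aStep_snd_eq (st : (Int × Int) × PySem.Dict (Int × Int) Int) (d : Char) :
    (aStep st d).2 = bCount st.2 (aStep st d).1 := by
  unfold aStep bCount
  by_cases h : PySem.Dict.contains st.2
      ((st.1.1 + (stepOf d).1, st.1.2 + (stepOf d).2) : Int × Int) = true
  · simp [h]
  · simp only [Bool.not_eq_true] at h
    rw [PySem.Dict.getD_of_not_contains (h := h)]
    simp [h]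

theorem a_fold_eq (l : List Char) :
    ∀ (pos : Int × Int) (c : PySem.Dict (Int × Int) Int),
      (l.foldl aStep (pos, c)).2 = (pathFrom pos l).foldl bCount c := by
  induction l with
  | nil => intro pos c; simp [pathFrom]
  | cons d l ih =>
      intro pos c
      have hs : aStep (pos, c) d =
          ((pos.1 + (stepOf d).1, pos.2 + (stepOf d).2),
            bCount c (pos.1 + (stepOf d).1, pos.2 + (stepOf d).2)) := by
        have h2 := aStep_snd_eq (pos, c) d
        have h1 : (aStep (pos, c) d).1 = (pos.1 + (stepOf d).1, pos.2 + (stepOf d).2) := rfl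
        exact Prod.ext h1 (by rw [h2, h1])
      simp only [List.foldl_cons, hs, ih, pathFrom]

theorem ports_agree (moves : String) : get_present_map moves = get_present_map_alt moves := by
  simp only [get_present_map, get_present_map_alt]
  have hA := a_fold_eq moves.toList ((0, 0) : Int × Int)
      (PySem.Dict.insert PySem.Dict.empty ((0, 0) : Int × Int) 1)
  have hcount : ∀ (path : List (Int × Int)),
      path.foldl bCount (PySem.Dict.insert PySem.Dict.empty ((0, 0) : Int × Int) 1)
        = PySem.Dict.counter (((0, 0) : Int × Int) :: path) := by
    intro path
    have h := PySem.Dict.foldl_insert_getD_add_one_eq_counter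
      (xs := (((0, 0) : Int × Int) :: path))
    simp only [List.foldl_cons, PySem.Dict.getD_empty, zero_add] at h
    rw [← h]
    rfl
  have hB := visitCounts_eq moves.toList ((0, 0) : Int × Int)
  rw [hA, hcount, hB]
  have hinit : PySem.Dict.insert PySem.Dict.empty ((0, 0) : Int × Int) 1
      = PySem.Dict.counter [((0, 0) : Int × Int)] := by
    have h := PySem.Dict.foldl_insert_getD_add_one_eq_counter
      (xs := [((0, 0) : Int × Int)])
    simp only [List.foldl_cons, List.foldl_nil, PySem.Dict.getD_empty, zero_add] at h
    exact h
  simp only [hinit]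
  rw [show mergeInto (PySem.Dict.counter [((0, 0) : Int × Int)])
        (PySem.Dict.counter (pathFrom (0, 0) moves.toList))
      = PySem.Dict.counter ([((0, 0) : Int × Int)] ++ pathFrom (0, 0) moves.toList)
    from merge_counters _ _]
  rfl

-- ===== VERDICT (by name: the statement is the Claim_ definition above) =====
theorem get_present_map_spec : Claim_equal_get_present_map := by
  intro moves _ _
  unfold Spec_get_present_map
  exact ports_agree moves
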